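-- pv_equiv track=rewrite | github.com/eliottcassidy2000/math | 04-computation/beta2_skeleton_connection.py | tiling_transpose_pairs
-- ===== SOURCE A (Python) =====
-- def tiling_transpose_pairs(n):
--     edges = []
--     for i in range(n):
--         for j in range(i+2, n):
--             edges.append((i, j))
--     edge_to_idx = {e: idx for idx, e in enumerate(edges)}
--     pairs, fixed = [], []
--     seen = set()
--     for idx, (i, j) in enumerate(edges):
--         if idx in seen: continue
--         ti, tj = n-1-j, n-1-i
--         if ti > tj: ti, tj = tj, ti
--         if (ti, tj) == (i, j):
--             fixed.append(idx)
--             seen.add(idx)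
--         elif (ti, tj) in edge_to_idx:
--             tidx = edge_to_idx[(ti, tj)]
--             pairs.append((idx, tidx))
--             seen.add(idx)
--             seen.add(tidx)
--     return pairs, fixed
-- ===== SOURCE B (Python) =====
-- def tiling_transpose_pairs(n):
--     pairs, fixed = [], []
--     for i in range(n):
--         for j in range(i + 2, n):
--             idx = i * (n - 2) - i * (i - 1) // 2 + (j - i - 2)
--             ti, tj = n - 1 - j, n - 1 - i
--             tidx = ti * (n - 2) - ti * (ti - 1) // 2 + (tj - ti - 2)
--             if (ti, tj) == (i, j):
--                 fixed.append(idx)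
--             elif idx < tidx:
--                 pairs.append((idx, tidx))
--     return pairs, fixed
-- ===== Notes on version B (the rewrite author's own statement) =====
-- stated objective: faster
-- what changed: B drops A's materialised edges list, edge-to-index dict and seen set: the same double loop computes each edge's index and its transpose's index by the closed form i*(n-2) - i*(i-1)//2 + (j-i-2) and appends a pair exactly when idx < tidx, which reproduces A's first-seen pairing.
import Mathlib
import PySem

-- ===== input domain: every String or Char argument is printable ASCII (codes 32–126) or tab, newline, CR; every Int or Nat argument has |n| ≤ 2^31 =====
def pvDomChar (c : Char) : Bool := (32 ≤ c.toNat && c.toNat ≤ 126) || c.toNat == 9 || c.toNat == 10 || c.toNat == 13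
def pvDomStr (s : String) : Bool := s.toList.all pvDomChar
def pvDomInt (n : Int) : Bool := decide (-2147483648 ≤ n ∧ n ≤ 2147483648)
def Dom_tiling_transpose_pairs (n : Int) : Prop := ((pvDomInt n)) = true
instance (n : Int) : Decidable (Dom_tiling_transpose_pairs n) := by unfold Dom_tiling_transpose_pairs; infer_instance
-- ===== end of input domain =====

-- B replaces A's edge list, edge-to-index dict and seen set by a closed-form index
-- formula and an idx < tidx test inside the same double loop (objective: faster).

-- ===== PORT A =====
-- the 'edges' list A builds with its nested append loop
def pvEdgesA (n : Int) : List (Int × Int) :=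
  (PySem.List.pyRange 0 n 1).foldl (fun acc i =>
    (PySem.List.pyRange (i + 2) n 1).foldl (fun acc j => acc ++ [(i, j)]) acc) []

-- edge_to_idx = {e: idx for idx, e in enumerate(edges)}
def pvDictA (edges : List (Int × Int)) : PySem.Dict (Int × Int) Int :=
  (PySem.List.enumerate edges 0).foldl (fun d p => d.insert p.2 p.1) PySem.Dict.empty

-- the body of A's main loop; state = (pairs, fixed, seen), p = (idx, (i, j))
def pvAbody (n : Int) (edge_to_idx : PySem.Dict (Int × Int) Int)
    (st : List (Int × Int) × List Int × PySem.Set Int)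
    (p : Int × (Int × Int)) : List (Int × Int) × List Int × PySem.Set Int :=
  if PySem.Set.contains st.2.2 p.1 then st
  else
    -- ti, tj = n-1-j, n-1-i; if ti > tj: ti, tj = tj, ti
    let tp := if n - 1 - p.2.2 > n - 1 - p.2.1 then (n - 1 - p.2.1, n - 1 - p.2.2)
              else (n - 1 - p.2.2, n - 1 - p.2.1)
    if tp = p.2 then (st.1, st.2.1 ++ [p.1], PySem.Set.add st.2.2 p.1)
    else
      match edge_to_idx.get? tp with
      | some tidx => (st.1 ++ [(p.1, tidx)], st.2.1, PySem.Set.add (PySem.Set.add st.2.2 p.1) tidx)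
      | none => st

def tiling_transpose_pairs (n : Int) : (List (Int × Int)) × List Int :=
  let edges := pvEdgesA n
  let edge_to_idx := pvDictA edges
  let r := (PySem.List.enumerate edges 0).foldl (pvAbody n edge_to_idx) ([], [], PySem.Set.empty)
  (r.1, r.2.1)

-- ===== PORT B =====
-- body of B's inner loop; state = (pairs, fixed)
def pvBinner (n i : Int) (st : List (Int × Int) × List Int) (j : Int) :
    List (Int × Int) × List Int :=
  let idx := i * (n - 2) - PySem.Int.floordiv (i * (i - 1)) 2 + (j - i - 2)
  let ti := n - 1 - j
  let tj := n - 1 - i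
  let tidx := ti * (n - 2) - PySem.Int.floordiv (ti * (ti - 1)) 2 + (tj - ti - 2)
  if (ti, tj) = (i, j) then (st.1, st.2 ++ [idx])
  else if idx < tidx then (st.1 ++ [(idx, tidx)], st.2)
  else st

def pvBrow (n : Int) (st : List (Int × Int) × List Int) (i : Int) :
    List (Int × Int) × List Int :=
  (PySem.List.pyRange (i + 2) n 1).foldl (pvBinner n i) st

def tiling_transpose_pairs_alt (n : Int) : (List (Int × Int)) × List Int :=
  (PySem.List.pyRange 0 n 1).foldl (pvBrow n) ([], [])

-- ===== PRECONDITION & SPEC =====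
def Spec_tiling_transpose_pairs (n : Int) (out : (List (Int × Int)) × List Int) : Prop := out = tiling_transpose_pairs_alt n
instance (n : Int) (out : (List (Int × Int)) × List Int) : Decidable (Spec_tiling_transpose_pairs n out) := by unfold Spec_tiling_transpose_pairs; infer_instance

-- ===== CLAIM (what is proved, stated in full; the proofs are below) =====
def Claim_equal_tiling_transpose_pairs : Prop := ∀ (n : Int), Dom_tiling_transpose_pairs n → Spec_tiling_transpose_pairs n (tiling_transpose_pairs n)

-- ===== LEMMAS AND PROOFS =====

-- the closed-form edge index (exactly B's formula)
def pvF (n i j : Int) : Int :=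
  i * (n - 2) - PySem.Int.floordiv (i * (i - 1)) 2 + (j - i - 2)

-- valid edges (i, j): 0 ≤ i, i + 2 ≤ j, j < n
def pvValid (n : Int) (e : Int × Int) : Prop := 0 ≤ e.1 ∧ e.1 + 2 ≤ e.2 ∧ e.2 < n

-- edges as a flatMap of rows
def pvRow (n i : Int) : List (Int × Int) := (PySem.List.pyRange (i + 2) n 1).map (fun j => (i, j))
def pvEdgesL (n : Int) : List (Int × Int) := (PySem.List.pyRange 0 n 1).flatMap (pvRow n)

-- what A's seen set contains after the first m edges have been processed
def pvS (n m x : Int) : Prop :=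
  ∃ a b : Int, pvValid n (a, b) ∧
    ((pvF n a b = x ∧ pvF n a b < m ∧ pvF n a b ≤ pvF n (n - 1 - b) (n - 1 - a)) ∨
     (pvF n (n - 1 - b) (n - 1 - a) = x ∧ pvF n a b < m ∧
        pvF n a b < pvF n (n - 1 - b) (n - 1 - a)))

theorem pvHalf (i : Int) : 2 * PySem.Int.floordiv (i * (i - 1)) 2 = i * (i - 1) := by
  have h : Even (i * (i - 1)) := by
    rcases Int.even_or_odd i with he | ho
    · exact he.mul_right _
    · have h2 : Even (i - 1) := by
        obtain ⟨k, hk⟩ := ho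
        exact ⟨k, by omega⟩
      exact h2.mul_left _
  rw [PySem.Int.floordiv_eq_ediv_of_pos (by norm_num)]
  obtain ⟨k, hk⟩ := h
  omega

theorem pvF_succ (n i j : Int) : pvF n i (j + 1) = pvF n i j + 1 := by
  unfold pvF; ring

-- row-start offset identity
theorem pvTstep (n a : Int) :
    pvF n a (a + 2) + (n - a - 2) = pvF n (a + 1) (a + 3) := by
  have h1 := pvHalf a
  have hb := pvHalf (a + 1)
  unfold pvF
  nlinarith [h1, hb]

theorem pvF_nonneg (n i j : Int) (h : pvValid n (i, j)) : 0 ≤ pvF n i j := by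
  obtain ⟨hi, hij, hj⟩ := h
  dsimp only at hi hij hj
  have h1 := pvHalf i
  have hm : 0 ≤ i * (2 * n - 3 - i) := mul_nonneg hi (by omega)
  unfold pvF
  nlinarith [hm, h1]

theorem pvF_lt_row (n i j i' j' : Int) (h : pvValid n (i, j)) (h' : pvValid n (i', j'))
    (hii : i < i') : pvF n i j < pvF n i' j' := by
  obtain ⟨hi, hij, hj⟩ := h
  obtain ⟨hi', hij', hj'⟩ := h'
  dsimp only at hi hij hj hi' hij' hj'
  have h1 := pvHalf i
  have h2 := pvHalf i'
  have hm : 0 ≤ (i' - i - 1) * (2 * (n - 2 - i) - (i' - i)) :=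
    mul_nonneg (by omega) (by omega)
  unfold pvF
  nlinarith [h1, h2, hm]

theorem pvF_inj (n i j i' j' : Int) (h : pvValid n (i, j)) (h' : pvValid n (i', j'))
    (heq : pvF n i j = pvF n i' j') : i = i' ∧ j = j' := by
  rcases lt_trichotomy i i' with hc | hc | hc
  · have := pvF_lt_row n i j i' j' h h' hc; omega
  · subst hc
    refine ⟨rfl, ?_⟩
    have h1 := pvHalf i
    unfold pvF at heq
    linarith
  · have := pvF_lt_row n i' j' i j h' h hc; omega

theorem pvT_valid (n i j : Int) (h : pvValid n (i, j)) : pvValid n (n - 1 - j, n - 1 - i) := by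
  obtain ⟨hi, hij, hj⟩ := h
  dsimp only at hi hij hj
  exact ⟨by omega, by omega, by omega⟩

-- A's append loops build exactly pvEdgesL
theorem pvEdgesA_eq (n : Int) : pvEdgesA n = pvEdgesL n := by
  unfold pvEdgesA pvEdgesL
  have h : ∀ (acc : List (Int × Int)) (i : Int), i ∈ PySem.List.pyRange 0 n 1 →
      (PySem.List.pyRange (i + 2) n 1).foldl (fun acc j => acc ++ [(i, j)]) acc =
        acc ++ pvRow n i := by
    intro acc i _
    rw [PySem.List.foldl_append_singleton_eq_map]
    rfl
  rw [PySem.List.foldl_congr_mem _ _ (fun acc i => acc ++ pvRow n i) _ h]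
  rw [PySem.List.foldl_append_eq_flatMap]
  simp

-- enumerating one row
theorem pvEnumRow (n a : Int) : ∀ (k : Nat) (j : Int), (n - j).toNat = k →
    PySem.List.enumerate ((PySem.List.pyRange j n 1).map (fun jj => (a, jj))) (pvF n a j) =
      (PySem.List.pyRange j n 1).map (fun jj => (pvF n a jj, (a, jj))) := by
  intro k
  induction k with
  | zero =>
    intro j hj
    rw [PySem.List.pyRange_one_eq_nil (by omega)]
    simp [PySem.List.enumerate_nil]
  | succ k ih =>
    intro j hj
    have hjn : j < n := by omega
    rw [PySem.List.pyRange_one_cons hjn]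
    simp only [List.map_cons, PySem.List.enumerate_cons]
    rw [← pvF_succ]
    rw [ih (j + 1) (by omega)]

-- enumerating the edge list pairs every edge with its closed-form index
theorem pvEnumAux (n : Int) : ∀ (k : Nat) (a : Int), 0 ≤ a → (n - a).toNat = k →
    PySem.List.enumerate ((PySem.List.pyRange a n 1).flatMap (pvRow n)) (pvF n a (a + 2)) =
      ((PySem.List.pyRange a n 1).flatMap (pvRow n)).map (fun e => (pvF n e.1 e.2, e)) := by
  intro k
  induction k with
  | zero =>
    intro a _ hk
    rw [PySem.List.pyRange_one_eq_nil (by omega)]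
    simp [PySem.List.enumerate_nil]
  | succ k ih =>
    intro a ha hk
    have han : a < n := by omega
    rw [PySem.List.pyRange_one_cons han, List.flatMap_cons, PySem.List.enumerate_append,
      List.map_append]
    have hrow : PySem.List.enumerate (pvRow n a) (pvF n a (a + 2)) =
        (pvRow n a).map (fun e => (pvF n e.1 e.2, e)) := by
      unfold pvRow
      rw [pvEnumRow n a ((n - (a + 2)).toNat) (a + 2) rfl]
      simp [List.map_map, Function.comp]
    rw [hrow]
    congr 1
    have hlen : ((pvRow n a).length : Int) = ((n - (a + 2)).toNat : Int) := by
      unfold pvRow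
      simp [PySem.List.length_pyRange_one]
    by_cases h2 : a + 1 < n
    · have harg : pvF n a (a + 2) + ((pvRow n a).length : Int) = pvF n (a + 1) (a + 1 + 2) := by
        rw [hlen]
        have hc : ((n - (a + 2)).toNat : Int) = n - a - 2 := by omega
        rw [hc]
        have e3 : a + 1 + 2 = a + 3 := by ring
        rw [e3]
        exact pvTstep n a
      rw [harg]
      exact ih (a + 1) (by omega) (by omega)
    · have hnil : PySem.List.pyRange (a + 1) n 1 = [] :=
        PySem.List.pyRange_one_eq_nil (by omega)
      rw [hnil]
      simp [PySem.List.enumerate_nil]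

theorem pvF_zero_two (n : Int) : pvF n 0 (0 + 2) = 0 := by
  unfold pvF
  rw [PySem.Int.floordiv_eq_ediv_of_pos (by norm_num)]
  norm_num

theorem pvEnumL (n : Int) :
    PySem.List.enumerate (pvEdgesL n) 0 = (pvEdgesL n).map (fun e => (pvF n e.1 e.2, e)) := by
  have h := pvEnumAux n ((n - 0).toNat) 0 le_rfl rfl
  rw [pvF_zero_two] at h
  exact h

theorem pvMemEdges (n : Int) (e : Int × Int) : e ∈ pvEdgesL n ↔ pvValid n e := by
  obtain ⟨x, y⟩ := e
  simp only [pvEdgesL, pvRow, List.mem_flatMap, List.mem_map, PySem.List.mem_pyRange_one,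
    pvValid]
  constructor
  · rintro ⟨i, ⟨hi0, hin⟩, j, ⟨hj1, hj2⟩, heq⟩
    injection heq with hx hy
    subst hx; subst hy
    exact ⟨hi0, hj1, hj2⟩
  · rintro ⟨h1, h2, h3⟩
    exact ⟨x, ⟨h1, by omega⟩, y, ⟨h2, h3⟩, rfl⟩

theorem pvNodupEdges (n : Int) : (pvEdgesL n).Nodup := by
  have h2 : (pvEdgesL n).map (fun e => pvF n e.1 e.2) =
      PySem.List.pyRange 0 (0 + (pvEdgesL n).length) 1 := by
    have h := PySem.List.map_fst_enumerate (pvEdgesL n) 0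
    rw [pvEnumL] at h
    simpa [List.map_map, Function.comp] using h
  have hnd : ((pvEdgesL n).map (fun e => pvF n e.1 e.2)).Nodup := by
    rw [h2]
    exact PySem.List.nodup_pyRange_one _ _
  exact hnd.of_map

theorem pvDictLem (n : Int) (e : Int × Int) (h : pvValid n e) :
    (pvDictA (pvEdgesL n)).get? e = some (pvF n e.1 e.2) := by
  have hsnd : ((PySem.List.enumerate (pvEdgesL n) 0).map (fun p => p.2)).Nodup := by
    rw [PySem.List.map_snd_enumerate]
    exact pvNodupEdges n
  have hitems : (pvDictA (pvEdgesL n)).items =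
      (pvEdgesL n).map (fun e => (e, pvF n e.1 e.2)) := by
    have hfresh := PySem.Dict.items_foldl_insert_fresh (PySem.List.enumerate (pvEdgesL n) 0)
      (fun p : Int × (Int × Int) => p.2) (fun p => p.1) PySem.Dict.empty
      (fun a _ => PySem.Dict.contains_empty _) hsnd
    have h2 : ((PySem.Dict.empty : PySem.Dict (Int × Int) Int).items ++
        (PySem.List.enumerate (pvEdgesL n) 0).map (fun p => (p.2, p.1))) =
        (pvEdgesL n).map (fun e => (e, pvF n e.1 e.2)) := by
      have hemp : (PySem.Dict.empty : PySem.Dict (Int × Int) Int).items = [] := rfl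
      rw [hemp, pvEnumL]
      simp [List.map_map, Function.comp_def]
    unfold pvDictA
    exact hfresh.trans h2
  have hkeys : (pvDictA (pvEdgesL n)).keys.Nodup := by
    have hk : (pvDictA (pvEdgesL n)).keys = pvEdgesL n := by
      simp only [PySem.Dict.keys, hitems, List.map_map]
      simp [Function.comp_def]
    rw [hk]
    exact pvNodupEdges n
  have hmem : (e, pvF n e.1 e.2) ∈ (pvDictA (pvEdgesL n)).items := by
    rw [hitems]
    exact List.mem_map_of_mem ((pvMemEdges n e).2 h)
  exact PySem.Dict.get?_of_mem_items _ hmem hkeys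

-- seen-set query at the current index
theorem pvSquery (n i j : Int) (hv : pvValid n (i, j)) :
    pvS n (pvF n i j) (pvF n i j) ↔ pvF n (n - 1 - j) (n - 1 - i) < pvF n i j := by
  constructor
  · rintro ⟨a, b, hv', hc | hc⟩
    · obtain ⟨h1, h2, _⟩ := hc
      omega
    · obtain ⟨h1, h2, h3⟩ := hc
      have hTv : pvValid n (n - 1 - b, n - 1 - a) := pvT_valid n a b hv'
      obtain ⟨e1, e2⟩ := pvF_inj n (n - 1 - b) (n - 1 - a) i j hTv hv h1
      have ha : a = n - 1 - j := by omega
      have hb : b = n - 1 - i := by omega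
      subst ha; subst hb
      exact h2
  · intro hlt
    refine ⟨n - 1 - j, n - 1 - i, pvT_valid n i j hv, Or.inr ?_⟩
    have e1 : n - 1 - (n - 1 - i) = i := by omega
    have e2 : n - 1 - (n - 1 - j) = j := by omega
    rw [e1, e2]
    exact ⟨rfl, hlt, hlt⟩

-- the three seen-set updates
theorem pvSsucc_fix (n i j : Int) (hv : pvValid n (i, j)) (hfix : i + j = n - 1) (x : Int) :
    pvS n (pvF n i j + 1) x ↔ pvS n (pvF n i j) x ∨ x = pvF n i j := by
  have e1 : n - 1 - j = i := by omega
  have e2 : n - 1 - i = j := by omega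
  constructor
  · rintro ⟨a, b, hv', hc | hc⟩
    · obtain ⟨h1, h2, h3⟩ := hc
      by_cases hm : pvF n a b < pvF n i j
      · exact Or.inl ⟨a, b, hv', Or.inl ⟨h1, hm, h3⟩⟩
      · have heq : pvF n a b = pvF n i j := by omega
        exact Or.inr (by rw [← h1, heq])
    · obtain ⟨h1, h2, h3⟩ := hc
      by_cases hm : pvF n a b < pvF n i j
      · exact Or.inl ⟨a, b, hv', Or.inr ⟨h1, hm, h3⟩⟩
      · exfalso
        have heq : pvF n a b = pvF n i j := by omega
        obtain ⟨ea, eb⟩ := pvF_inj n a b i j hv' hv heq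
        subst ea; subst eb
        rw [e1, e2] at h3
        omega
  · rintro (⟨a, b, hv', hc | hc⟩ | rfl)
    · obtain ⟨h1, h2, h3⟩ := hc
      exact ⟨a, b, hv', Or.inl ⟨h1, by omega, h3⟩⟩
    · obtain ⟨h1, h2, h3⟩ := hc
      exact ⟨a, b, hv', Or.inr ⟨h1, by omega, h3⟩⟩
    · refine ⟨i, j, hv, Or.inl ?_⟩
      rw [e1, e2]
      exact ⟨rfl, by omega, le_rfl⟩

theorem pvSsucc_pair (n i j : Int) (hv : pvValid n (i, j))
    (hlt : pvF n i j < pvF n (n - 1 - j) (n - 1 - i)) (x : Int) :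
    pvS n (pvF n i j + 1) x ↔
      pvS n (pvF n i j) x ∨ x = pvF n i j ∨ x = pvF n (n - 1 - j) (n - 1 - i) := by
  constructor
  · rintro ⟨a, b, hv', hc | hc⟩
    · obtain ⟨h1, h2, h3⟩ := hc
      by_cases hm : pvF n a b < pvF n i j
      · exact Or.inl ⟨a, b, hv', Or.inl ⟨h1, hm, h3⟩⟩
      · have heq : pvF n a b = pvF n i j := by omega
        exact Or.inr (Or.inl (by rw [← h1, heq]))
    · obtain ⟨h1, h2, h3⟩ := hc
      by_cases hm : pvF n a b < pvF n i j
      · exact Or.inl ⟨a, b, hv', Or.inr ⟨h1, hm, h3⟩⟩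
      · have heq : pvF n a b = pvF n i j := by omega
        obtain ⟨ea, eb⟩ := pvF_inj n a b i j hv' hv heq
        subst ea; subst eb
        exact Or.inr (Or.inr h1.symm)
  · rintro (⟨a, b, hv', hc | hc⟩ | rfl | rfl)
    · obtain ⟨h1, h2, h3⟩ := hc
      exact ⟨a, b, hv', Or.inl ⟨h1, by omega, h3⟩⟩
    · obtain ⟨h1, h2, h3⟩ := hc
      exact ⟨a, b, hv', Or.inr ⟨h1, by omega, h3⟩⟩
    · exact ⟨i, j, hv, Or.inl ⟨rfl, by omega, le_of_lt hlt⟩⟩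
    · exact ⟨i, j, hv, Or.inr ⟨rfl, by omega, hlt⟩⟩

theorem pvSsucc_skip (n i j : Int) (hv : pvValid n (i, j))
    (hgt : pvF n (n - 1 - j) (n - 1 - i) < pvF n i j) (x : Int) :
    pvS n (pvF n i j + 1) x ↔ pvS n (pvF n i j) x := by
  constructor
  · rintro ⟨a, b, hv', hc | hc⟩
    · obtain ⟨h1, h2, h3⟩ := hc
      by_cases hm : pvF n a b < pvF n i j
      · exact ⟨a, b, hv', Or.inl ⟨h1, hm, h3⟩⟩
      · exfalso
        have heq : pvF n a b = pvF n i j := by omega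
        obtain ⟨ea, eb⟩ := pvF_inj n a b i j hv' hv heq
        subst ea; subst eb
        omega
    · obtain ⟨h1, h2, h3⟩ := hc
      by_cases hm : pvF n a b < pvF n i j
      · exact ⟨a, b, hv', Or.inr ⟨h1, hm, h3⟩⟩
      · exfalso
        have heq : pvF n a b = pvF n i j := by omega
        obtain ⟨ea, eb⟩ := pvF_inj n a b i j hv' hv heq
        subst ea; subst eb
        omega
  · rintro ⟨a, b, hv', hc | hc⟩
    · obtain ⟨h1, h2, h3⟩ := hc
      exact ⟨a, b, hv', Or.inl ⟨h1, by omega, h3⟩⟩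
    · obtain ⟨h1, h2, h3⟩ := hc
      exact ⟨a, b, hv', Or.inr ⟨h1, by omega, h3⟩⟩

-- processing one edge
theorem pvStep (n i j : Int) (hv : pvValid n (i, j)) (pairs : List (Int × Int))
    (fixed : List Int) (seen : PySem.Set Int)
    (hs : ∀ x : Int, x ∈ seen ↔ pvS n (pvF n i j) x) :
    ∃ seen' : PySem.Set Int,
      pvAbody n (pvDictA (pvEdgesL n)) (pairs, fixed, seen) (pvF n i j, (i, j)) =
        ((pvBinner n i (pairs, fixed) j).1, (pvBinner n i (pairs, fixed) j).2, seen') ∧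
      (∀ x : Int, x ∈ seen' ↔ pvS n (pvF n i j + 1) x) := by
  obtain ⟨hi, hij, hjn⟩ := hv
  dsimp only at hi hij hjn
  have hv' : pvValid n (i, j) := ⟨hi, hij, hjn⟩
  have hswap : ¬ (n - 1 - j > n - 1 - i) := by omega
  have hcont_iff : PySem.Set.contains seen (pvF n i j) = true ↔
      pvF n (n - 1 - j) (n - 1 - i) < pvF n i j := by
    rw [PySem.Set.contains_iff, hs]
    exact pvSquery n i j hv'
  by_cases hfix : i + j = n - 1
  · -- transpose-fixed edge
    have he1 : n - 1 - j = i := by omega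
    have he2 : n - 1 - i = j := by omega
    have htF : pvF n (n - 1 - j) (n - 1 - i) = pvF n i j := by rw [he1, he2]
    have hcontF : PySem.Set.contains seen (pvF n i j) = false := by
      have h1 : ¬ PySem.Set.contains seen (pvF n i j) = true := by
        rw [hcont_iff]; omega
      exact Bool.eq_false_iff.mpr h1
    refine ⟨PySem.Set.add seen (pvF n i j), ?_, ?_⟩
    · simp only [pvAbody, pvBinner, hcontF, Bool.false_eq_true, if_false,
        if_neg hswap, if_pos (show ((n - 1 - j : Int), (n - 1 - i : Int)) = (i, j) by
          rw [he1, he2])]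
      rfl
    · intro x
      rw [PySem.Set.mem_add, hs, pvSsucc_fix n i j hv' hfix x]
  · have hne : ((n - 1 - j : Int), (n - 1 - i : Int)) ≠ ((i : Int), (j : Int)) := by
      intro hcon
      injection hcon with h1 h2
      omega
    have hneF : pvF n (n - 1 - j) (n - 1 - i) ≠ pvF n i j := by
      intro hcon
      obtain ⟨e1, e2⟩ := pvF_inj n (n - 1 - j) (n - 1 - i) i j (pvT_valid n i j hv') hv' hcon
      omega
    rcases lt_or_gt_of_ne hneF with hlt | hgt
    · -- seen: skip; B also appends nothing
      have hcontT : PySem.Set.contains seen (pvF n i j) = true := hcont_iff.mpr hlt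
      refine ⟨seen, ?_, ?_⟩
      · simp only [pvAbody, pvBinner, hcontT, if_true, if_neg hswap, if_neg hne,
          if_neg (show ¬ (i * (n - 2) - PySem.Int.floordiv (i * (i - 1)) 2 + (j - i - 2) <
            (n - 1 - j) * (n - 2) -
              PySem.Int.floordiv ((n - 1 - j) * (n - 1 - j - 1)) 2 + (n - 1 - i - (n - 1 - j) - 2))
            from by
              have : pvF n (n - 1 - j) (n - 1 - i) < pvF n i j := hlt
              unfold pvF at this
              omega)]
      · intro x
        rw [hs, pvSsucc_skip n i j hv' hlt x]
    · -- new pair; B appends (idx, tidx)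
      have hcontF : PySem.Set.contains seen (pvF n i j) = false := by
        have h1 : ¬ PySem.Set.contains seen (pvF n i j) = true := by
          rw [hcont_iff]; omega
        exact Bool.eq_false_iff.mpr h1
      have hget : (pvDictA (pvEdgesL n)).get? ((n - 1 - j : Int), (n - 1 - i : Int)) =
          some (pvF n (n - 1 - j) (n - 1 - i)) :=
        pvDictLem n (n - 1 - j, n - 1 - i) (pvT_valid n i j hv')
      refine ⟨PySem.Set.add (PySem.Set.add seen (pvF n i j)) (pvF n (n - 1 - j) (n - 1 - i)),
        ?_, ?_⟩
      · simp only [pvAbody, pvBinner, hcontF, Bool.false_eq_true, if_false, if_neg hswap,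
          if_neg hne, hget,
          if_pos (show (i * (n - 2) - PySem.Int.floordiv (i * (i - 1)) 2 + (j - i - 2) <
            (n - 1 - j) * (n - 2) -
              PySem.Int.floordiv ((n - 1 - j) * (n - 1 - j - 1)) 2 + (n - 1 - i - (n - 1 - j) - 2))
            from by
              have : pvF n i j < pvF n (n - 1 - j) (n - 1 - i) := hgt
              unfold pvF at this
              omega)]
        rfl
      · intro x
        rw [PySem.Set.mem_add, PySem.Set.mem_add, hs, pvSsucc_pair n i j hv' hgt x]
        tauto

-- one row of A's main loop
theorem pvRowLem (n i : Int) (hi : 0 ≤ i) : ∀ (k : Nat) (j : Int), i + 2 ≤ j →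
    (n - j).toNat = k →
    ∀ (pairs : List (Int × Int)) (fixed : List Int) (seen : PySem.Set Int),
      (∀ x : Int, x ∈ seen ↔ pvS n (pvF n i j) x) →
      ∃ seen' : PySem.Set Int,
        ((PySem.List.pyRange j n 1).map (fun jj => (pvF n i jj, (i, jj)))).foldl (pvAbody n (pvDictA (pvEdgesL n)))
            (pairs, fixed, seen) =
          (((PySem.List.pyRange j n 1).foldl (pvBinner n i) (pairs, fixed)).1,
           ((PySem.List.pyRange j n 1).foldl (pvBinner n i) (pairs, fixed)).2, seen') ∧
        (∀ x : Int, x ∈ seen' ↔ pvS n (pvF n i j + ((n - j).toNat : Int)) x) := by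
  intro k
  induction k with
  | zero =>
    intro j hij hk pairs fixed seen hs
    rw [PySem.List.pyRange_one_eq_nil (by omega)]
    refine ⟨seen, rfl, ?_⟩
    intro x
    have hz : ((n - j).toNat : Int) = 0 := by omega
    rw [hz, add_zero]
    exact hs x
  | succ k ih =>
    intro j hij hk pairs fixed seen hs
    have hjn : j < n := by omega
    rw [PySem.List.pyRange_one_cons hjn]
    simp only [List.map_cons, List.foldl_cons]
    have hvij : pvValid n (i, j) := ⟨hi, hij, hjn⟩
    obtain ⟨seen1, hstep, hs1⟩ := pvStep n i j hvij pairs fixed seen hs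
    rw [hstep]
    have hs1' : ∀ x, x ∈ seen1 ↔ pvS n (pvF n i (j + 1)) x := by
      intro x
      rw [hs1 x, pvF_succ]
    obtain ⟨seen', hrest, hs'⟩ := ih (j + 1) (by omega) (by omega)
      (pvBinner n i (pairs, fixed) j).1 (pvBinner n i (pairs, fixed) j).2 seen1 hs1'
    refine ⟨seen', hrest, ?_⟩
    intro x
    rw [hs' x]
    have harg : pvF n i (j + 1) + ((n - (j + 1)).toNat : Int) =
        pvF n i j + ((n - j).toNat : Int) := by
      rw [pvF_succ]
      omega
    rw [harg]

-- the whole main loop, row by row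
theorem pvOuterLem (n : Int) : ∀ (k : Nat) (a : Int), 0 ≤ a → (n - a).toNat = k →
    ∀ (pairs : List (Int × Int)) (fixed : List Int) (seen : PySem.Set Int),
      (∀ x : Int, x ∈ seen ↔ pvS n (pvF n a (a + 2)) x) →
      ((((PySem.List.pyRange a n 1).flatMap
            (fun i => (PySem.List.pyRange (i + 2) n 1).map (fun j => (pvF n i j, (i, j))))).foldl
          (pvAbody n (pvDictA (pvEdgesL n))) (pairs, fixed, seen)).1,
       (((PySem.List.pyRange a n 1).flatMap
            (fun i => (PySem.List.pyRange (i + 2) n 1).map (fun j => (pvF n i j, (i, j))))).foldl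
          (pvAbody n (pvDictA (pvEdgesL n))) (pairs, fixed, seen)).2.1) =
      (PySem.List.pyRange a n 1).foldl (pvBrow n) (pairs, fixed) := by
  intro k
  induction k with
  | zero =>
    intro a ha hk pairs fixed seen hs
    rw [PySem.List.pyRange_one_eq_nil (by omega)]
    rfl
  | succ k ih =>
    intro a ha hk pairs fixed seen hs
    have han : a < n := by omega
    rw [PySem.List.pyRange_one_cons han, List.flatMap_cons, List.foldl_append, List.foldl_cons]
    obtain ⟨seen1, hrow, hs1⟩ := pvRowLem n a ha ((n - (a + 2)).toNat) (a + 2) le_rfl rfl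
      pairs fixed seen hs
    rw [hrow]
    have hBrow : ((PySem.List.pyRange (a + 2) n 1).foldl (pvBinner n a) (pairs, fixed)) =
        pvBrow n (pairs, fixed) a := rfl
    by_cases h2 : a + 1 < n
    · have harg : pvF n a (a + 2) + ((n - (a + 2)).toNat : Int) =
          pvF n (a + 1) (a + 1 + 2) := by
        have hc : ((n - (a + 2)).toNat : Int) = n - a - 2 := by omega
        rw [hc]
        have e3 : a + 1 + 2 = a + 3 := by ring
        rw [e3]
        exact pvTstep n a
      rw [harg] at hs1
      have := ih (a + 1) (by omega) (by omega)
        ((PySem.List.pyRange (a + 2) n 1).foldl (pvBinner n a) (pairs, fixed)).1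
        ((PySem.List.pyRange (a + 2) n 1).foldl (pvBinner n a) (pairs, fixed)).2 seen1 hs1
      rw [hBrow] at this
      exact this
    · have hnil : PySem.List.pyRange (a + 1) n 1 = [] :=
        PySem.List.pyRange_one_eq_nil (by omega)
      rw [hnil]
      simp only [List.flatMap_nil, List.foldl_nil]
      rw [hBrow]

-- ===== VERDICT (by name: the statement is the Claim_ definition above) =====
theorem tiling_transpose_pairs_spec : Claim_equal_tiling_transpose_pairs := by
  unfold Claim_equal_tiling_transpose_pairs
  intro n _
  unfold Spec_tiling_transpose_pairs
  show tiling_transpose_pairs n = tiling_transpose_pairs_alt n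
  unfold tiling_transpose_pairs tiling_transpose_pairs_alt
  rw [pvEdgesA_eq]
  show (((PySem.List.enumerate (pvEdgesL n) 0).foldl (pvAbody n (pvDictA (pvEdgesL n)))
          ([], [], PySem.Set.empty)).1,
        ((PySem.List.enumerate (pvEdgesL n) 0).foldl (pvAbody n (pvDictA (pvEdgesL n)))
          ([], [], PySem.Set.empty)).2.1) =
      (PySem.List.pyRange 0 n 1).foldl (pvBrow n) ([], [])
  rw [pvEnumL]
  have hmm : (pvEdgesL n).map (fun e => (pvF n e.1 e.2, e)) =
      (PySem.List.pyRange 0 n 1).flatMap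
        (fun i => (PySem.List.pyRange (i + 2) n 1).map (fun j => (pvF n i j, (i, j)))) := by
    simp [pvEdgesL, pvRow, List.map_flatMap, List.map_map, Function.comp_def]
  rw [hmm]
  have hseen0 : ∀ x : Int, x ∈ (PySem.Set.empty : PySem.Set Int) ↔ pvS n (pvF n 0 (0 + 2)) x := by
    intro x
    rw [pvF_zero_two]
    constructor
    · intro hx
      simp [PySem.Set.empty] at hx
    · rintro ⟨a, b, hv, hc | hc⟩
      · have := pvF_nonneg n a b hv
        omega
      · have := pvF_nonneg n a b hv
        omega
  exact pvOuterLem n ((n - 0).toNat) 0 le_rfl rfl [] [] PySem.Set.empty hseen0
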